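-- pv_equiv track=rewrite | github.com/denis-svg/customer-api | azure/urls.py | pageBefore
-- ===== SOURCE A (Python) =====
-- def pageBefore(person_id_dict, event_name):
--     urls = {}
--     for person_id in person_id_dict.keys():
--         previous_url = None
--         for event in person_id_dict[person_id]:
--             url = event[0]
--             name = event[2]
--             if name == event_name and previous_url is not None:
--                 if previous_url not in urls:
--                     urls[previous_url] = 1
--                 else:
--                     urls[previous_url] += 1
--             previous_url = url
--
--     return urls
-- ===== SOURCE B (Python) =====
-- def pageBefore(person_id_dict, event_name):
--     # Stage 1: recursively extract, per person, the URLs of events immediately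
--     # preceding an occurrence of event_name; Stage 2: count them in one
--     # dict comprehension (first-occurrence key order, total count as value).
--     def prevs(events):
--         if len(events) < 2:
--             return []
--         rest = prevs(events[1:])
--         return ([events[0][0]] + rest) if events[1][2] == event_name else rest
--
--     flat = []
--     for events in person_id_dict.values():
--         flat += prevs(events)
--     return {u: flat.count(u) for u in flat}
-- ===== Notes on version B (the rewrite author's own statement) =====
-- stated objective: alternative
-- what changed: Replaces A's single stateful pass (previous_url accumulator with incremental two-branch counting) by two staged passes: a recursive helper first extracts the flat list of predecessor URLs of matching events, then a counting dict comprehension {u: flat.count(u) for u in flat} builds the result.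
import Mathlib
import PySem

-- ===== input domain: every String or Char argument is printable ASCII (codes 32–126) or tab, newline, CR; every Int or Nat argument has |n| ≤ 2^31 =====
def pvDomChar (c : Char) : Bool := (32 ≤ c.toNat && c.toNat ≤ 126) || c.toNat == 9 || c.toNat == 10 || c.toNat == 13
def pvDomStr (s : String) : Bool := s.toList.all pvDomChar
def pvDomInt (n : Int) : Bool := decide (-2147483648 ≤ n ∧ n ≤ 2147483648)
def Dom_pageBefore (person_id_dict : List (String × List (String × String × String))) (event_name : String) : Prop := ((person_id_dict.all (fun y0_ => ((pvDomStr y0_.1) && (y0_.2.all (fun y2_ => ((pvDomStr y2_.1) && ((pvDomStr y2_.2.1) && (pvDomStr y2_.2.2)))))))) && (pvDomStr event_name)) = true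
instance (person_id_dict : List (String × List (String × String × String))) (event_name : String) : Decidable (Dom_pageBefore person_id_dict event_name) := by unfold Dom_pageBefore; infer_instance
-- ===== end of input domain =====

-- B replaces A's single stateful previous_url/incremental-count pass by two staged passes:
-- a recursive extraction of predecessor URLs, then a counting dict comprehension. Objective: alternative decomposition.


-- ===== PORT A =====
-- A's inner-loop body: state is (urls, previous_url)
def pvStepA (event_name : String)
    (st : PySem.Dict String Int × Option String) (event : String × String × String) :
    PySem.Dict String Int × Option String :=
  let url := event.1
  let name := event.2.2
  let urls :=
    if name == event_name && st.2.isSome then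
      match st.2 with
      | some previous_url =>
          if st.1.contains previous_url = false then st.1.insert previous_url 1
          else st.1.modify previous_url 0 (· + 1)
      | none => st.1
    else st.1
  (urls, some url)

def pageBefore (person_id_dict : List (String × List (String × String × String))) (event_name : String) : List (String × Int) :=
  let d := PySem.Dict.ofList person_id_dict
  (d.keys.foldl
    (fun urls person_id =>
      ((d.getD person_id []).foldl (pvStepA event_name) (urls, (none : Option String))).1)
    PySem.Dict.empty).items

-- ===== PORT B =====
-- B's recursive helper prevs(events): predecessor URLs of matching events in one list
def pvPrevs (event_name : String) : List (String × String × String) → List String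
  | [] => []
  | [_] => []
  | a :: b :: rest =>
      let r := pvPrevs event_name (b :: rest)
      if b.2.2 == event_name then a.1 :: r else r

def pageBefore_alt (person_id_dict : List (String × List (String × String × String))) (event_name : String) : List (String × Int) :=
  let flat := (PySem.Dict.ofList person_id_dict).values.foldl
    (fun acc events => acc ++ pvPrevs event_name events) []
  (flat.foldl (fun d u => d.insert u ((PySem.List.count flat u : Int))) PySem.Dict.empty).items

-- ===== PRECONDITION & SPEC =====
def Spec_pageBefore (person_id_dict : List (String × List (String × String × String))) (event_name : String) (out : List (String × Int)) : Prop := out = pageBefore_alt person_id_dict event_name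
instance (person_id_dict : List (String × List (String × String × String))) (event_name : String) (out : List (String × Int)) : Decidable (Spec_pageBefore person_id_dict event_name out) := by unfold Spec_pageBefore; infer_instance

-- ===== CLAIM (what is proved, stated in full; the proofs are below) =====
def Claim_equal_pageBefore : Prop := ∀ (person_id_dict : List (String × List (String × String × String))) (event_name : String), Dom_pageBefore person_id_dict event_name → Spec_pageBefore person_id_dict event_name (pageBefore person_id_dict event_name)

-- ===== LEMMAS AND PROOFS =====

-- A's two-branch update is the standard get-default-increment insert.
theorem pvBump_eq (d : PySem.Dict String Int) (u : String) :
    (if d.contains u = false then d.insert u 1 else d.modify u 0 (· + 1))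
      = d.insert u (d.getD u 0 + 1) := by
  by_cases h : d.contains u = false
  · have h0 : d.getD u 0 = 0 := PySem.Dict.getD_of_not_contains d 0 h
    simp [h, h0]
  · simp [h]; rfl

-- Once previous_url = some e.1, A's remaining scan counts exactly pvPrevs (e :: es).
theorem pvInnerA_some (en : String) (es : List (String × String × String)) :
    ∀ (d : PySem.Dict String Int) (e : String × String × String),
      (es.foldl (pvStepA en) (d, some e.1)).1
        = (pvPrevs en (e :: es)).foldl (fun d u => d.insert u (d.getD u 0 + 1)) d := by
  induction es with
  | nil => intro d e; rfl
  | cons f rest ih =>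
      intro d e
      have hstep : pvStepA en (d, some e.1) f
          = ((if f.2.2 == en then d.insert e.1 (d.getD e.1 0 + 1) else d), some f.1) := by
        simp only [pvStepA]
        by_cases h : f.2.2 == en
        · simp [h, pvBump_eq]
        · simp [h]
      by_cases h : f.2.2 == en
      · simp only [List.foldl_cons, hstep, h, if_true, pvPrevs]
        simpa [h] using ih (d.insert e.1 (d.getD e.1 0 + 1)) f
      · simp only [List.foldl_cons, hstep, h, pvPrevs]
        simpa [h] using ih d f

-- A's whole inner loop (previous_url = None at start) counts pvPrevs es.
theorem pvInnerA (en : String) (es : List (String × String × String))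
    (d : PySem.Dict String Int) :
    (es.foldl (pvStepA en) (d, none)).1
      = (pvPrevs en es).foldl (fun d u => d.insert u (d.getD u 0 + 1)) d := by
  cases es with
  | nil => rfl
  | cons e rest =>
      have hstep : pvStepA en (d, (none : Option String)) e = (d, some e.1) := by
        simp [pvStepA]
      simp only [List.foldl_cons, hstep]
      exact pvInnerA_some en rest d e

-- Filling a dict with a fixed function of the key: final lookup.
theorem pvGetD_fill (c : String → Int) (l : List String) :
    ∀ (d : PySem.Dict String Int) (v : String),
      (l.foldl (fun d u => d.insert u (c u)) d).getD v 0
        = if v ∈ l then c v else d.getD v 0 := by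
  induction l with
  | nil => intro d v; simp
  | cons x t ih =>
      intro d v
      by_cases hvt : v ∈ t
      · simp [List.foldl_cons, ih, hvt]
      · by_cases hvx : v = x
        · subst hvx; simp [List.foldl_cons, ih, hvt]
        · have := PySem.Dict.getD_insert_of_ne (d := d) (v := c x) (d0 := (0 : Int)) hvx
          simp [List.foldl_cons, ih, hvt, hvx, this]

-- B's counting comprehension over flat produces Counter(flat)'s items.
theorem pvFill_items_eq_counter (flat : List String) :
    (flat.foldl (fun d u => d.insert u ((PySem.List.count flat u : Int))) PySem.Dict.empty).items
      = (PySem.Dict.counter flat (κ := String)).items := by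
  set DB := flat.foldl (fun d u => d.insert u ((PySem.List.count flat u : Int))) PySem.Dict.empty with hDB
  have hkeys : DB.keys = PySem.Set.ofList flat := by
    rw [hDB, PySem.Dict.keys_foldl_insert]
    simp [PySem.Set.update_nil_left]
  have hnd : DB.keys.Nodup := by
    rw [hkeys]; exact PySem.Set.nodup_ofList flat
  rw [PySem.Dict.items_eq_map_keys DB hnd 0, PySem.Dict.items_counter, hkeys]
  refine List.map_congr_left ?_
  intro k hk
  have hkf : k ∈ flat := (PySem.Set.mem_ofList _ _).1 hk
  rw [hDB, pvGetD_fill]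
  simp [hkf, PySem.List.count_eq]

-- ===== VERDICT (by name: the statement is the Claim_ definition above) =====
theorem pageBefore_spec : Claim_equal_pageBefore := by
  intro pid en _
  simp only [Spec_pageBefore, pageBefore, pageBefore_alt]
  have hnd : (PySem.Dict.ofList pid).keys.Nodup := PySem.Dict.nodup_keys_ofList pid
  have hflat : (PySem.Dict.ofList pid).values.foldl
      (fun acc events => acc ++ pvPrevs en events) []
      = (PySem.Dict.ofList pid).keys.flatMap
          (fun k => pvPrevs en ((PySem.Dict.ofList pid).getD k [])) := by
    rw [PySem.List.foldl_append_eq_flatMap, List.nil_append,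
        PySem.Dict.values_eq_map_keys (PySem.Dict.ofList pid) hnd
          ([] : List (String × String × String)), List.flatMap_map]
  rw [hflat]
  have hA : ((PySem.Dict.ofList pid).keys.foldl
      (fun urls k =>
        (((PySem.Dict.ofList pid).getD k []).foldl (pvStepA en) (urls, (none : Option String))).1)
      PySem.Dict.empty)
      = ((PySem.Dict.ofList pid).keys.flatMap
          (fun k => pvPrevs en ((PySem.Dict.ofList pid).getD k []))).foldl
          (fun d u => d.insert u (d.getD u 0 + 1)) PySem.Dict.empty := by
    rw [List.foldl_flatMap]
    apply PySem.List.foldl_congr_mem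
    intro d k _
    exact pvInnerA en ((PySem.Dict.ofList pid).getD k []) d
  rw [hA, PySem.Dict.foldl_insert_getD_add_one_eq_counter, pvFill_items_eq_counter]
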